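-- pv_equiv track=rewrite | github.com/toddpalino/advent-of-code | 2023/01/calibration2.py | get_digit
-- ===== SOURCE A (Python) =====
-- digit_strings = {
-- 	'one': "1",
-- 	'two': "2",
-- 	'three': "3",
-- 	'four': "4",
-- 	'five': "5",
-- 	'six': "6",
-- 	'seven': "7",
-- 	'eight': "8",
-- 	'nine': "9"
-- }
--
-- def get_digit(str, idx):
-- 	if str[idx].isdigit():
-- 		return str[idx]
-- 	else:
-- 		for k, v in digit_strings.items():
-- 			if str[idx:].startswith(k):
-- 				return v
-- 	return None
-- ===== SOURCE B (Python) =====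
-- def get_digit(str, idx):
--     c = str[idx]
--     if c.isdigit():
--         return c
--     tail = str[idx:]
--     if c == 'o':
--         return "1" if tail[:3] == "one" else None
--     if c == 't':
--         if tail[:3] == "two":
--             return "2"
--         if tail[:5] == "three":
--             return "3"
--         return None
--     if c == 'f':
--         if tail[:4] == "four":
--             return "4"
--         if tail[:4] == "five":
--             return "5"
--         return None
--     if c == 's':
--         if tail[:3] == "six":
--             return "6"
--         if tail[:5] == "seven":
--             return "7"
--         return None
--     if c == 'e':
--         return "8" if tail[:5] == "eight" else None
--     if c == 'n':
--         return "9" if tail[:4] == "nine" else None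
--     return None
-- ===== Notes on version B (the rewrite author's own statement) =====
-- stated objective: alternative
-- what changed: B replaces A's loop over all nine spelled words (each tested with startswith on the tail) by a loop-free decision tree dispatching on the character at idx, comparing at most two fixed-length prefixes of the tail.
-- outside the precondition, e.g. on get_digit('one', 5): A raises IndexError, B raises IndexError
import Mathlib
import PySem

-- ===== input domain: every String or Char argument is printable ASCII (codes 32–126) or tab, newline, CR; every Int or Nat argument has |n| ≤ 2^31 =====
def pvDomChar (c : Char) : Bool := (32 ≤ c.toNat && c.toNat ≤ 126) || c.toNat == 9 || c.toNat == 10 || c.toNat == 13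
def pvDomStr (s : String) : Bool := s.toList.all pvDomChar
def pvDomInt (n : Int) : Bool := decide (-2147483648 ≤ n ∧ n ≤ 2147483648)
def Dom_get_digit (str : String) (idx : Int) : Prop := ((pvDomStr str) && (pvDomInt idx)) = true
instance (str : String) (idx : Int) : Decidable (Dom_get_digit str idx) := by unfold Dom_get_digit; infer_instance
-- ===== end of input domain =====

-- B replaces A's loop over the nine spelled words (startswith scans of the tail) by a
-- loop-free decision tree on the character at idx, comparing at most two fixed-length
-- prefixes of the tail (objective: alternative).

-- ===== PORT A =====
def digit_strings : PySem.Dict String String := PySem.Dict.ofList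
  [("one", "1"), ("two", "2"), ("three", "3"), ("four", "4"), ("five", "5"),
   ("six", "6"), ("seven", "7"), ("eight", "8"), ("nine", "9")]

-- the 'for k, v in digit_strings.items()' loop of A
def getDigitScanA : List (String × String) → String → Option String
  | [], _ => none
  | (k, v) :: rest, tail =>
    if PySem.Str.startswith tail k then some v else getDigitScanA rest tail

def get_digit (str : String) (idx : Int) : Option String :=
  match PySem.Str.pyGet? str idx with
  | none => none   -- str[idx] raises IndexError: excluded by Pre_get_digit
  | some c =>
    if PySem.Chars.isdigit c then some (String.ofList [c])
    else getDigitScanA digit_strings.items (PySem.Str.slice str (some idx) none)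

-- ===== PORT B =====
def get_digit_alt (str : String) (idx : Int) : Option String :=
  match PySem.Str.pyGet? str idx with
  | none => none   -- str[idx] raises IndexError: excluded by Pre_get_digit
  | some c =>
    if PySem.Chars.isdigit c then some (String.ofList [c])
    else
      let tail := PySem.Str.slice str (some idx) none
      if c = 'o' then (if PySem.Str.slice tail none (some 3) = "one" then some "1" else none)
      else if c = 't' then
        (if PySem.Str.slice tail none (some 3) = "two" then some "2"
         else if PySem.Str.slice tail none (some 5) = "three" then some "3" else none)
      else if c = 'f' then
        (if PySem.Str.slice tail none (some 4) = "four" then some "4"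
         else if PySem.Str.slice tail none (some 4) = "five" then some "5" else none)
      else if c = 's' then
        (if PySem.Str.slice tail none (some 3) = "six" then some "6"
         else if PySem.Str.slice tail none (some 5) = "seven" then some "7" else none)
      else if c = 'e' then (if PySem.Str.slice tail none (some 5) = "eight" then some "8" else none)
      else if c = 'n' then (if PySem.Str.slice tail none (some 4) = "nine" then some "9" else none)
      else none

-- ===== PRECONDITION & SPEC =====
-- A evaluates str[idx], which raises IndexError when idx is out of range; Pre_ excludes exactly that.
def Pre_get_digit (str : String) (idx : Int) : Prop := PySem.Raise.InRange str.toList.length idx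
instance (str : String) (idx : Int) : Decidable (Pre_get_digit str idx) := by unfold Pre_get_digit; infer_instance
def pvWitness_get_digit : String × Int := ("xtwo1", 1)

def Spec_get_digit (str : String) (idx : Int) (out : Option String) : Prop := out = get_digit_alt str idx
instance (str : String) (idx : Int) (out : Option String) : Decidable (Spec_get_digit str idx out) := by unfold Spec_get_digit; infer_instance

-- ===== CLAIM (what is proved, stated in full; the proofs are below) =====
def Claim_equal_get_digit : Prop := ∀ (str : String) (idx : Int), Dom_get_digit str idx → Pre_get_digit str idx → Spec_get_digit str idx (get_digit str idx)

-- ===== LEMMAS AND PROOFS =====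

theorem startswith_take (l w : List Char) : PySem.Chars.startswith l w = (l.take w.length == w) := by
  by_cases h : w <+: l
  · simp [(PySem.Chars.startswith_iff l w).2 h, (List.prefix_iff_eq_take.1 h).symm]
  · have h1 : PySem.Chars.startswith l w = false := by
      simp [← PySem.Chars.startswith_iff l w] at h; exact h
    have h2 : ¬ (l.take w.length = w) := fun he => h (List.prefix_iff_eq_take.2 he.symm)
    simp [h1, h2]

theorem scanA_unfolded (l : List Char) : getDigitScanA digit_strings.items (String.ofList l) =
  (if l.take 3 = ['o','n','e'] then some "1"
   else if l.take 3 = ['t','w','o'] then some "2"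
   else if l.take 5 = ['t','h','r','e','e'] then some "3"
   else if l.take 4 = ['f','o','u','r'] then some "4"
   else if l.take 4 = ['f','i','v','e'] then some "5"
   else if l.take 3 = ['s','i','x'] then some "6"
   else if l.take 5 = ['s','e','v','e','n'] then some "7"
   else if l.take 5 = ['e','i','g','h','t'] then some "8"
   else if l.take 4 = ['n','i','n','e'] then some "9"
   else none) := by
  rw [show digit_strings.items =
    [("one", "1"), ("two", "2"), ("three", "3"), ("four", "4"), ("five", "5"),
     ("six", "6"), ("seven", "7"), ("eight", "8"), ("nine", "9")] from rfl]
  simp only [getDigitScanA, PySem.Str.startswith_eq, String.toList_ofList, startswith_take]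
  simp only [show "one".toList = ['o','n','e'] from by decide,
    show "two".toList = ['t','w','o'] from by decide,
    show "six".toList = ['s','i','x'] from by decide,
    show "four".toList = ['f','o','u','r'] from by decide,
    show "five".toList = ['f','i','v','e'] from by decide,
    show "three".toList = ['t','h','r','e','e'] from by decide,
    show "seven".toList = ['s','e','v','e','n'] from by decide,
    show "eight".toList = ['e','i','g','h','t'] from by decide,
    show "nine".toList = ['n','i','n','e'] from by decide,
    List.length_cons, List.length_nil, beq_iff_eq]

theorem slice_take (l : List Char) (n : Nat) :
    PySem.Str.slice (String.ofList l) none (some (n : Int)) = String.ofList (l.take n) := by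
  simp [PySem.Str.slice, PySem.List.slice_to_natCast]

theorem ofList_eq_lit (xs ys : List Char) : (String.ofList xs = String.ofList ys) ↔ xs = ys := by
  constructor
  · intro h; have := congrArg String.toList h; simpa using this
  · intro h; rw [h]

theorem head_take {l w : List Char} {n : Nat} (hn : 0 < n) (h : l.take n = w) :
    w.head? = l.head? := by
  cases l with
  | nil => cases n <;> simp_all
  | cons a t =>
    cases n with
    | zero => simp_all
    | succ m => rw [← h]; rfl

theorem take_ne_of_head {l w : List Char} {c : Char} (hc : l.head? = some c)
    (n : Nat) (hn : 0 < n) (hx : w.head? ≠ some c) : l.take n ≠ w :=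
  fun hw => hx ((head_take hn hw).trans hc)

-- head of the tail slice l[idx:] is l[idx] when the index is in range
theorem head_slice_from (l : List Char) (i : Int) (c : Char)
    (h : PySem.List.pyGet? l i = some c) :
    (PySem.List.slice l (some i) none).head? = some c := by
  by_cases hi : 0 ≤ i
  · rw [PySem.List.slice_from l hi, List.head?_drop]
    rw [PySem.List.pyGet?_of_nonneg l hi] at h; exact h
  · have hi' : i < 0 := by omega
    have hin : PySem.Raise.InRange l.length i := by
      by_contra hn
      rw [(PySem.List.pyGet?_eq_none_iff l i).2 hn] at h; simp at h
    have hb : -(l.length : Int) ≤ i ∧ i < l.length := by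
      simpa [PySem.Raise.InRange] using hin
    set k : Nat := (-i).toNat with hk
    have hki : (k : Int) = -i := Int.toNat_of_nonneg (by omega)
    have hik : i = -(k : Int) := by omega
    have hk0 : 0 < k := by omega
    have hkl : k ≤ l.length := by omega
    rw [hik] at h ⊢
    rw [PySem.List.slice_from_neg_natCast l k hk0, List.head?_drop]
    rw [PySem.List.pyGet?_neg_natCast l k hk0 hkl] at h
    exact h

-- the heart: A's nine-word startswith scan equals B's decision tree on the head character
theorem scan_tree (c : Char) (l : List Char) (hc : l.head? = some c) :
    getDigitScanA digit_strings.items (String.ofList l) =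
      (if c = 'o' then (if PySem.Str.slice (String.ofList l) none (some 3) = "one" then some "1" else none)
       else if c = 't' then
        (if PySem.Str.slice (String.ofList l) none (some 3) = "two" then some "2"
         else if PySem.Str.slice (String.ofList l) none (some 5) = "three" then some "3" else none)
       else if c = 'f' then
        (if PySem.Str.slice (String.ofList l) none (some 4) = "four" then some "4"
         else if PySem.Str.slice (String.ofList l) none (some 4) = "five" then some "5" else none)
       else if c = 's' then
        (if PySem.Str.slice (String.ofList l) none (some 3) = "six" then some "6"
         else if PySem.Str.slice (String.ofList l) none (some 5) = "seven" then some "7" else none)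
       else if c = 'e' then (if PySem.Str.slice (String.ofList l) none (some 5) = "eight" then some "8" else none)
       else if c = 'n' then (if PySem.Str.slice (String.ofList l) none (some 4) = "nine" then some "9" else none)
       else none) := by
  simp only [show (3 : Int) = ((3 : Nat) : Int) from rfl,
    show (4 : Int) = ((4 : Nat) : Int) from rfl,
    show (5 : Int) = ((5 : Nat) : Int) from rfl, slice_take,
    show ("one" : String) = String.ofList ['o','n','e'] from by decide,
    show ("two" : String) = String.ofList ['t','w','o'] from by decide,
    show ("three" : String) = String.ofList ['t','h','r','e','e'] from by decide,
    show ("four" : String) = String.ofList ['f','o','u','r'] from by decide,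
    show ("five" : String) = String.ofList ['f','i','v','e'] from by decide,
    show ("six" : String) = String.ofList ['s','i','x'] from by decide,
    show ("seven" : String) = String.ofList ['s','e','v','e','n'] from by decide,
    show ("eight" : String) = String.ofList ['e','i','g','h','t'] from by decide,
    show ("nine" : String) = String.ofList ['n','i','n','e'] from by decide,
    ofList_eq_lit, scanA_unfolded]
  by_cases ho : c = 'o'
  · subst ho
    simp [take_ne_of_head hc 3 (by decide) (show (['t','w','o'] : List Char).head? ≠ some 'o' from by decide),
      take_ne_of_head hc 5 (by decide) (show (['t','h','r','e','e'] : List Char).head? ≠ some 'o' from by decide),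
      take_ne_of_head hc 4 (by decide) (show (['f','o','u','r'] : List Char).head? ≠ some 'o' from by decide),
      take_ne_of_head hc 4 (by decide) (show (['f','i','v','e'] : List Char).head? ≠ some 'o' from by decide),
      take_ne_of_head hc 3 (by decide) (show (['s','i','x'] : List Char).head? ≠ some 'o' from by decide),
      take_ne_of_head hc 5 (by decide) (show (['s','e','v','e','n'] : List Char).head? ≠ some 'o' from by decide),
      take_ne_of_head hc 5 (by decide) (show (['e','i','g','h','t'] : List Char).head? ≠ some 'o' from by decide),
      take_ne_of_head hc 4 (by decide) (show (['n','i','n','e'] : List Char).head? ≠ some 'o' from by decide)]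
  by_cases ht : c = 't'
  · subst ht
    simp [ho, take_ne_of_head hc 3 (by decide) (show (['o','n','e'] : List Char).head? ≠ some 't' from by decide),
      take_ne_of_head hc 4 (by decide) (show (['f','o','u','r'] : List Char).head? ≠ some 't' from by decide),
      take_ne_of_head hc 4 (by decide) (show (['f','i','v','e'] : List Char).head? ≠ some 't' from by decide),
      take_ne_of_head hc 3 (by decide) (show (['s','i','x'] : List Char).head? ≠ some 't' from by decide),
      take_ne_of_head hc 5 (by decide) (show (['s','e','v','e','n'] : List Char).head? ≠ some 't' from by decide),
      take_ne_of_head hc 5 (by decide) (show (['e','i','g','h','t'] : List Char).head? ≠ some 't' from by decide),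
      take_ne_of_head hc 4 (by decide) (show (['n','i','n','e'] : List Char).head? ≠ some 't' from by decide)]
  by_cases hf : c = 'f'
  · subst hf
    simp [ho, ht, take_ne_of_head hc 3 (by decide) (show (['o','n','e'] : List Char).head? ≠ some 'f' from by decide),
      take_ne_of_head hc 3 (by decide) (show (['t','w','o'] : List Char).head? ≠ some 'f' from by decide),
      take_ne_of_head hc 5 (by decide) (show (['t','h','r','e','e'] : List Char).head? ≠ some 'f' from by decide),
      take_ne_of_head hc 3 (by decide) (show (['s','i','x'] : List Char).head? ≠ some 'f' from by decide),
      take_ne_of_head hc 5 (by decide) (show (['s','e','v','e','n'] : List Char).head? ≠ some 'f' from by decide),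
      take_ne_of_head hc 5 (by decide) (show (['e','i','g','h','t'] : List Char).head? ≠ some 'f' from by decide),
      take_ne_of_head hc 4 (by decide) (show (['n','i','n','e'] : List Char).head? ≠ some 'f' from by decide)]
  by_cases hs : c = 's'
  · subst hs
    simp [ho, ht, hf, take_ne_of_head hc 3 (by decide) (show (['o','n','e'] : List Char).head? ≠ some 's' from by decide),
      take_ne_of_head hc 3 (by decide) (show (['t','w','o'] : List Char).head? ≠ some 's' from by decide),
      take_ne_of_head hc 5 (by decide) (show (['t','h','r','e','e'] : List Char).head? ≠ some 's' from by decide),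
      take_ne_of_head hc 4 (by decide) (show (['f','o','u','r'] : List Char).head? ≠ some 's' from by decide),
      take_ne_of_head hc 4 (by decide) (show (['f','i','v','e'] : List Char).head? ≠ some 's' from by decide),
      take_ne_of_head hc 5 (by decide) (show (['e','i','g','h','t'] : List Char).head? ≠ some 's' from by decide),
      take_ne_of_head hc 4 (by decide) (show (['n','i','n','e'] : List Char).head? ≠ some 's' from by decide)]
  by_cases he : c = 'e'
  · subst he
    simp [ho, ht, hf, hs, take_ne_of_head hc 3 (by decide) (show (['o','n','e'] : List Char).head? ≠ some 'e' from by decide),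
      take_ne_of_head hc 3 (by decide) (show (['t','w','o'] : List Char).head? ≠ some 'e' from by decide),
      take_ne_of_head hc 5 (by decide) (show (['t','h','r','e','e'] : List Char).head? ≠ some 'e' from by decide),
      take_ne_of_head hc 4 (by decide) (show (['f','o','u','r'] : List Char).head? ≠ some 'e' from by decide),
      take_ne_of_head hc 4 (by decide) (show (['f','i','v','e'] : List Char).head? ≠ some 'e' from by decide),
      take_ne_of_head hc 3 (by decide) (show (['s','i','x'] : List Char).head? ≠ some 'e' from by decide),
      take_ne_of_head hc 5 (by decide) (show (['s','e','v','e','n'] : List Char).head? ≠ some 'e' from by decide),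
      take_ne_of_head hc 4 (by decide) (show (['n','i','n','e'] : List Char).head? ≠ some 'e' from by decide)]
  by_cases hn : c = 'n'
  · subst hn
    simp [ho, ht, hf, hs, he, take_ne_of_head hc 3 (by decide) (show (['o','n','e'] : List Char).head? ≠ some 'n' from by decide),
      take_ne_of_head hc 3 (by decide) (show (['t','w','o'] : List Char).head? ≠ some 'n' from by decide),
      take_ne_of_head hc 5 (by decide) (show (['t','h','r','e','e'] : List Char).head? ≠ some 'n' from by decide),
      take_ne_of_head hc 4 (by decide) (show (['f','o','u','r'] : List Char).head? ≠ some 'n' from by decide),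
      take_ne_of_head hc 4 (by decide) (show (['f','i','v','e'] : List Char).head? ≠ some 'n' from by decide),
      take_ne_of_head hc 3 (by decide) (show (['s','i','x'] : List Char).head? ≠ some 'n' from by decide),
      take_ne_of_head hc 5 (by decide) (show (['s','e','v','e','n'] : List Char).head? ≠ some 'n' from by decide),
      take_ne_of_head hc 5 (by decide) (show (['e','i','g','h','t'] : List Char).head? ≠ some 'n' from by decide)]
  · -- c is none of the first letters: every word check fails
    have hallne : ∀ (w : List Char) (n : Nat), 0 < n → w.head? ≠ some c → l.take n ≠ w :=
      fun w n hn0 hx => take_ne_of_head hc n hn0 hx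
    simp [ho, ht, hf, hs, he, hn,
      hallne ['o','n','e'] 3 (by decide) (by simp; intro hh; exact ho hh.symm ),
      hallne ['t','w','o'] 3 (by decide) (by simp; intro hh; exact ht hh.symm),
      hallne ['t','h','r','e','e'] 5 (by decide) (by simp; intro hh; exact ht hh.symm),
      hallne ['f','o','u','r'] 4 (by decide) (by simp; intro hh; exact hf hh.symm),
      hallne ['f','i','v','e'] 4 (by decide) (by simp; intro hh; exact hf hh.symm),
      hallne ['s','i','x'] 3 (by decide) (by simp; intro hh; exact hs hh.symm),
      hallne ['s','e','v','e','n'] 5 (by decide) (by simp; intro hh; exact hs hh.symm),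
      hallne ['e','i','g','h','t'] 5 (by decide) (by simp; intro hh; exact he hh.symm),
      hallne ['n','i','n','e'] 4 (by decide) (by simp; intro hh; exact hn hh.symm)]

-- ===== VERDICT (by name: the statement is the Claim_ definition above) =====
theorem get_digit_spec : Claim_equal_get_digit := by
  intro str idx _ _
  unfold Spec_get_digit get_digit get_digit_alt
  cases hg : PySem.Str.pyGet? str idx with
  | none => rfl
  | some c =>
    by_cases hd : PySem.Chars.isdigit c
    · simp [hd]
    · simp only [if_neg hd]
      have hg' : PySem.List.pyGet? str.toList idx = some c := by
        simpa [PySem.Str.pyGet?, PySem.Chars.pyGet?_eq_listPyGet?] using hg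
      have hsl : PySem.Str.slice str (some idx) none
          = String.ofList (PySem.List.slice str.toList (some idx) none) := by
        simp [PySem.Str.slice]
      have hc : (PySem.List.slice str.toList (some idx) none).head? = some c :=
        head_slice_from _ _ _ hg'
      rw [hsl]
      exact scan_tree c _ hc
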